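-- pv_equiv track=rewrite | github.com/OxQuasar/nous-memories | iching/relations/free_action_proof.py | mat_vec_f2
-- ===== SOURCE A (Python) =====
-- def mat_vec_f2(A, v, n=3):
--     result = 0
--     for i in range(n):
--         s = 0
--         for j in range(n):
--             s ^= A[i][j] & ((v >> j) & 1)
--         result |= (s << i)
--     return result
-- ===== SOURCE B (Python) =====
-- def mat_vec_f2(A, v, n=3):
--     acc = [0] * max(n, 0)
--     for j in range(n):
--         if (v >> j) & 1:
--             acc = [x ^ row[j] for x, row in zip(acc, A)]
--     result = 0
--     for i, x in enumerate(acc):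
--         result |= (x & 1) << i
--     return result
-- ===== Notes on version B (the rewrite author's own statement) =====
-- stated objective: alternative
-- what changed: B is column-major and staged: for each set bit j of v it XOR-folds column j into a whole accumulator vector at once (zip comprehension over rows), skipping unset columns entirely, and a separate final pass packs the accumulator's parities into the result; A is row-major with a per-entry mask-and-XOR inner loop building each result bit in place.
import Mathlib
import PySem

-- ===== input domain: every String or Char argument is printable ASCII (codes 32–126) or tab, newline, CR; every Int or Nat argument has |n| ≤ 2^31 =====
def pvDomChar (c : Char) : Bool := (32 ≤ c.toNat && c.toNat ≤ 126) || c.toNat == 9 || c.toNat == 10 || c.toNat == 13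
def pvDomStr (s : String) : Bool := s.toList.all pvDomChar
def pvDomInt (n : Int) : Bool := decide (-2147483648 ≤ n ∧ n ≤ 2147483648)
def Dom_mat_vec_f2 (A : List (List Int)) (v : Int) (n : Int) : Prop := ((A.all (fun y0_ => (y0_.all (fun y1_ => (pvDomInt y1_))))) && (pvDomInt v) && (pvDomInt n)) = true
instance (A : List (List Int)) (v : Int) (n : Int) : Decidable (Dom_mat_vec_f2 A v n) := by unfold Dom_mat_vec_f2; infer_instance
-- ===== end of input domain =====

-- B is column-major and staged: for each set bit j of v it XOR-folds column j into a whole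
-- accumulator vector at once, skipping unset columns, then a second pass packs the accumulator's
-- parities into the result; A is row-major with a per-entry mask-and-XOR inner loop (alternative
-- decomposition, same cost).

-- ===== PORT A =====
def mat_vec_f2 (A : List (List Int)) (v : Int) (n : Int) : Int :=
  (PySem.List.pyRange 0 n).foldl (fun result i =>
    let s := (PySem.List.pyRange 0 n).foldl
      (fun s j => PySem.Int.bxor s (PySem.Int.band (PySem.List.pyGetD (PySem.List.pyGetD A i []) j 0)
                    (PySem.Int.band (v >>> j.toNat) 1))) 0
    PySem.Int.bor result (s <<< i.toNat)) 0

-- ===== PORT B =====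
def mat_vec_f2_alt (A : List (List Int)) (v : Int) (n : Int) : Int :=
  (PySem.List.enumerate
    ((PySem.List.pyRange 0 n).foldl (fun acc j =>
      if PySem.Int.band (v >>> j.toNat) 1 ≠ 0 then
        (acc.zip A).map (fun p => PySem.Int.bxor p.1 (PySem.List.pyGetD p.2 j 0))
      else acc) (List.replicate (max n 0).toNat 0))).foldl (fun result p =>
    PySem.Int.bor result ((PySem.Int.band p.2 1) <<< p.1.toNat)) 0

-- ===== PRECONDITION & SPEC =====
-- Pre_ excludes exactly the inputs where Python A raises IndexError: some row index i < n or
-- column index j < n falls outside A or its row.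
def Pre_mat_vec_f2 (A : List (List Int)) (v : Int) (n : Int) : Prop :=
  n ≤ PySem.List.len A ∧ ∀ r ∈ A.take n.toNat, n ≤ PySem.List.len r
instance (A : List (List Int)) (v : Int) (n : Int) : Decidable (Pre_mat_vec_f2 A v n) := by
  unfold Pre_mat_vec_f2; infer_instance
def pvWitness_mat_vec_f2 : List (List Int) × Int × Int := ([[1, 0, 1], [0, 1, 1], [1, 1, 0]], 5, 3)

def Spec_mat_vec_f2 (A : List (List Int)) (v : Int) (n : Int) (out : Int) : Prop := out = mat_vec_f2_alt A v n
instance (A : List (List Int)) (v : Int) (n : Int) (out : Int) : Decidable (Spec_mat_vec_f2 A v n out) := by unfold Spec_mat_vec_f2; infer_instance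

-- ===== CLAIM (what is proved, stated in full; the proofs are below) =====
def Claim_equal_mat_vec_f2 : Prop := ∀ (A : List (List Int)) (v : Int) (n : Int), Dom_mat_vec_f2 A v n → Pre_mat_vec_f2 A v n → Spec_mat_vec_f2 A v n (mat_vec_f2 A v n)

-- ===== LEMMAS AND PROOFS =====

-- A's inner loop (XOR of masked entries) and B's per-row column accumulation, as functions of the bound
def pvSA (r : List Int) (v : Int) (k : Nat) : Int :=
  (List.map (fun j : Nat => (j : Int)) (List.range k)).foldl
    (fun s j => PySem.Int.bxor s (PySem.Int.band (PySem.List.pyGetD r j 0)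
      (PySem.Int.band (v >>> j.toNat) 1))) 0

def pvG (r : List Int) (v : Int) (k : Nat) : Int :=
  (List.map (fun j : Nat => (j : Int)) (List.range k)).foldl
    (fun x j => if PySem.Int.band (v >>> (j.toNat : Int)) 1 ≠ 0
      then PySem.Int.bxor x (PySem.List.pyGetD r j 0) else x) 0

-- parity-of-xor bridge lemmas (Python-exact on negatives via negSucc cases)
lemma pv_negSucc_eq_int (m : Nat) : Int.negSucc m = -(m : Int) - 1 := by
  rw [Int.negSucc_eq]; ring

lemma pv_band_negSucc_one (m : Nat) :
    PySem.Int.band (Int.negSucc m) 1 = ((1 - (m &&& 1) : Nat) : Int) := by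
  have h : ¬ (0 : Int) ≤ Int.negSucc m := by rw [pv_negSucc_eq_int]; omega
  simp only [PySem.Int.band, h, if_pos (by norm_num : (0:Int) ≤ 1)]
  norm_num [pv_negSucc_eq_int, Nat.and_comm]

lemma pv_bxor_natCast_negSucc (m k : Nat) :
    PySem.Int.bxor (m : Int) (Int.negSucc k) = Int.negSucc (m ^^^ k) := by
  have h : ¬ (0 : Int) ≤ Int.negSucc k := by rw [pv_negSucc_eq_int]; omega
  simp only [PySem.Int.bxor, h, if_pos (Int.natCast_nonneg m)]
  rw [pv_negSucc_eq_int, pv_negSucc_eq_int]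
  norm_num

lemma pv_bxor_negSucc_natCast (m k : Nat) :
    PySem.Int.bxor (Int.negSucc m) (k : Int) = Int.negSucc (m ^^^ k) := by
  have h : ¬ (0 : Int) ≤ Int.negSucc m := by rw [pv_negSucc_eq_int]; omega
  simp only [PySem.Int.bxor, h, if_pos (Int.natCast_nonneg k)]
  rw [pv_negSucc_eq_int, pv_negSucc_eq_int]
  norm_num

lemma pv_bxor_negSucc_negSucc (m k : Nat) :
    PySem.Int.bxor (Int.negSucc m) (Int.negSucc k) = ((m ^^^ k : Nat) : Int) := by
  have h1 : ¬ (0 : Int) ≤ Int.negSucc m := by rw [pv_negSucc_eq_int]; omega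
  have h2 : ¬ (0 : Int) ≤ Int.negSucc k := by rw [pv_negSucc_eq_int]; omega
  simp only [PySem.Int.bxor, h1, h2]
  rw [pv_negSucc_eq_int, pv_negSucc_eq_int]
  norm_num

lemma pv_band_natCast_one (m : Nat) :
    PySem.Int.band (m : Int) 1 = ((m &&& 1 : Nat) : Int) := by
  have := PySem.Int.band_natCast m 1
  norm_num at this ⊢; exact this

lemma pv_parity_bxor (a b : Int) :
    PySem.Int.band (PySem.Int.bxor a b) 1 = PySem.Int.bxor (PySem.Int.band a 1) (PySem.Int.band b 1) := by
  have key : ∀ x y : Nat, (x ^^^ y) &&& 1 = (x &&& 1) ^^^ (y &&& 1) :=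
    fun _ _ => Nat.and_xor_distrib_right
  have hle : ∀ z : Nat, z &&& 1 ≤ 1 := fun _ => Nat.and_le_right
  rcases a with x | x <;> rcases b with y | y
  · rw [Int.ofNat_eq_natCast, Int.ofNat_eq_natCast, PySem.Int.bxor_natCast,
        pv_band_natCast_one, pv_band_natCast_one, pv_band_natCast_one,
        PySem.Int.bxor_natCast, key]
  · rw [Int.ofNat_eq_natCast, pv_bxor_natCast_negSucc, pv_band_negSucc_one,
        pv_band_natCast_one, pv_band_negSucc_one, PySem.Int.bxor_natCast, key]
    have hx := hle x; have hy := hle y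
    congr 1
    set p := x &&& 1; set q := y &&& 1
    interval_cases p <;> interval_cases q <;> rfl
  · rw [Int.ofNat_eq_natCast, pv_bxor_negSucc_natCast, pv_band_negSucc_one,
        pv_band_negSucc_one, pv_band_natCast_one, PySem.Int.bxor_natCast, key]
    have hx := hle x; have hy := hle y
    congr 1
    set p := x &&& 1; set q := y &&& 1
    interval_cases p <;> interval_cases q <;> rfl
  · rw [pv_bxor_negSucc_negSucc, pv_band_natCast_one, pv_band_negSucc_one,
        pv_band_negSucc_one, PySem.Int.bxor_natCast, key]
    have hx := hle x; have hy := hle y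
    congr 1
    set p := x &&& 1; set q := y &&& 1
    interval_cases p <;> interval_cases q <;> rfl

-- a & 1 is 0 or 1
lemma pv_band1_01 (a : Int) : PySem.Int.band a 1 = 0 ∨ PySem.Int.band a 1 = 1 := by
  rw [PySem.Int.band_one]
  have h1 := PySem.Int.mod_nonneg a (b := 2) (by norm_num)
  have h2 := PySem.Int.mod_lt a (b := 2) (by norm_num)
  omega

-- pointwise: the parity of B's per-row column XOR is A's inner-loop accumulator
lemma pv_point (r : List Int) (v : Int) (k : Nat) :
    PySem.Int.band (pvG r v k) 1 = pvSA r v k := by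
  induction k with
  | zero =>
      show PySem.Int.band 0 1 = 0
      rw [PySem.Int.band_comm, PySem.Int.band_zero]
  | succ k ih =>
      unfold pvG pvSA at ih ⊢
      rw [List.range_succ, List.map_append, List.foldl_append, List.foldl_append]
      simp only [List.map_cons, List.map_nil, List.foldl_cons, List.foldl_nil]
      have hV : (v >>> ((((k : Int)).toNat : Nat) : Int)) = v >>> ((k : Int)).toNat :=
        Int.shiftRight_natCast_right v _
      rcases pv_band1_01 (v >>> ((k : Int)).toNat) with hb | hb
      · rw [if_neg (by rw [hV, hb]; simp), hb, PySem.Int.band_zero, PySem.Int.bxor_zero]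
        exact ih
      · rw [if_pos (by rw [hV, hb]; norm_num), pv_parity_bxor, ih, hb]

-- B's column fold, characterised: after k columns the accumulator holds each row's pvG value
lemma pv_acc (A : List (List Int)) (v : Int) (m : Nat) (hm : m ≤ A.length) (k : Nat) :
    (List.map (fun j : Nat => (j : Int)) (List.range k)).foldl
      (fun acc j =>
        if PySem.Int.band (v >>> (j.toNat : Int)) 1 ≠ 0 then
          (acc.zip A).map (fun p => PySem.Int.bxor p.1 (PySem.List.pyGetD p.2 j 0))
        else acc)
      (List.replicate m 0)
    = (List.range m).map (fun i => pvG (A.getD i []) v k) := by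
  induction k with
  | zero =>
      simp [pvG, List.map_const']
  | succ k ih =>
      rw [List.range_succ, List.map_append, List.foldl_append]
      rw [ih]
      have hstep : ∀ r : List Int, pvG r v (k + 1)
          = if PySem.Int.band (v >>> ((((k : Int)).toNat : Nat) : Int)) 1 ≠ 0
            then PySem.Int.bxor (pvG r v k) (PySem.List.pyGetD r (k : Int) 0) else pvG r v k := by
        intro r
        unfold pvG
        rw [List.range_succ, List.map_append, List.foldl_append]
        simp only [List.map_cons, List.map_nil, List.foldl_cons, List.foldl_nil]
      simp only [List.map_cons, List.map_nil, List.foldl_cons, List.foldl_nil]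
      by_cases hb : PySem.Int.band (v >>> ((((k : Int)).toNat : Nat) : Int)) 1 ≠ 0
      · rw [if_pos hb]
        apply List.ext_getElem
        · simp [Nat.min_eq_left hm]
        · intro i h1 h2
          simp only [List.getElem_map, List.getElem_zip, List.getElem_range]
          have hi : i < m := by simpa [Nat.min_eq_left hm] using h1
          have hiA : i < A.length := lt_of_lt_of_le hi hm
          rw [hstep, if_pos hb, List.getD_eq_getElem A [] hiA]
      · rw [if_neg hb]
        apply List.map_congr_left
        intro i _
        rw [hstep, if_neg hb]

-- A's inner fold after index normalisation is pvSA
lemma pv_sa_norm (r : List Int) (v : Int) (m : Nat) :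
    List.foldl (fun x y => PySem.Int.bxor x (PySem.Int.band (r.getD y 0) (PySem.Int.band (v >>> y) 1)))
      0 (List.range m) = pvSA r v m := by
  unfold pvSA
  rw [List.foldl_map]
  apply PySem.List.foldl_congr_mem
  intro acc x _
  rw [PySem.List.pyGetD_natCast, Int.toNat_natCast]

lemma pv_pyRange_nonpos (n : Int) (h : n ≤ 0) : PySem.List.pyRange 0 n = [] := by
  simp [PySem.List.pyRange]; omega

-- ===== VERDICT (by name: the statement is the Claim_ definition above) =====
theorem mat_vec_f2_spec : Claim_equal_mat_vec_f2 := by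
  intro A v n _ hpre
  unfold Spec_mat_vec_f2 mat_vec_f2 mat_vec_f2_alt
  by_cases hn : 0 < n
  · have hmax : (max n 0).toNat = n.toNat := by omega
    have hmA : n.toNat ≤ A.length := by
      have := hpre.1
      simp only [PySem.List.len] at this
      omega
    have hrange : PySem.List.pyRange 0 n
        = List.map (fun j : Nat => (j : Int)) (List.range n.toNat) := by
      conv_lhs => rw [show n = ((n.toNat : Nat) : Int) from (Int.toNat_of_nonneg (le_of_lt hn)).symm]
      exact PySem.List.pyRange_zero_natCast n.toNat
    rw [hmax, hrange, pv_acc A v n.toNat hmA n.toNat]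
    have hlen : PySem.List.len ((List.range n.toNat).map (fun i => pvG (A.getD i []) v n.toNat)) = n := by
      simp [PySem.List.len, Int.toNat_of_nonneg (le_of_lt hn)]
    rw [PySem.List.enumerate_eq_map_pyRange _ 0, hlen, hrange]
    simp only [List.foldl_map]
    apply PySem.List.foldl_congr_mem
    intro res k hk
    rw [List.mem_range] at hk
    simp only [Int.toNat_natCast, PySem.List.pyGetD_natCast]
    rw [PySem.List.getD_map_range _ _ _ _ hk, pv_point, ← pv_sa_norm, Int.shiftLeft_natCast_right]
  · rw [pv_pyRange_nonpos n (by omega)]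
    have hmax : (max n 0).toNat = 0 := by omega
    rw [hmax]
    rfl
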